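-- pv_equiv track=rewrite | github.com/nonameuserd/runform | src/akc/compile/patch_utils.py | extract_touched_paths
-- ===== SOURCE A (Python) =====
-- def extract_touched_paths(patch_text: str) -> list[str]:
--     """Extract touched file paths from a unified diff.
--
--     Best-effort and deterministic: returns stable sorted unique paths.
--     """
--
--     paths: set[str] = set()
--     for raw in (patch_text or "").splitlines():
--         line = raw.strip()
--         # Common forms:
--         # --- a/foo.py
--         # +++ b/foo.py
--         if line.startswith("+++ "):
--             p = line[4:].strip()
--             if p.startswith("b/"):
--                 p = p[2:]
--             if p and p != "/dev/null":
--                 paths.add(p)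
--         elif line.startswith("--- "):
--             p = line[4:].strip()
--             if p.startswith("a/"):
--                 p = p[2:]
--             if p and p != "/dev/null":
--                 paths.add(p)
--     return sorted(paths)
-- ===== SOURCE B (Python) =====
-- def extract_touched_paths(patch_text: str) -> list[str]:
--     """Extract touched file paths from a unified diff (two marker-specific passes)."""
--     lines = [raw.strip() for raw in (patch_text or "").splitlines()]
--
--     def paths_for(marker: str, prefix: str) -> list[str]:
--         out = []
--         for line in lines:
--             if line.startswith(marker):
--                 p = line[len(marker):].strip()
--                 if p.startswith(prefix):
--                     p = p[len(prefix):]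
--                 if p and p != "/dev/null":
--                     out.append(p)
--         return out
--
--     return sorted(set(paths_for("+++ ", "b/") + paths_for("--- ", "a/")))
-- ===== Notes on version B (the rewrite author's own statement) =====
-- stated objective: alternative
-- what changed: A's single pass with an elif chain over both markers is replaced by two marker-specific filter passes over pre-stripped lines whose concatenated candidates are deduplicated and sorted; correctness rests on marker lines being mutually exclusive so traversal order does not matter.
import Mathlib
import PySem

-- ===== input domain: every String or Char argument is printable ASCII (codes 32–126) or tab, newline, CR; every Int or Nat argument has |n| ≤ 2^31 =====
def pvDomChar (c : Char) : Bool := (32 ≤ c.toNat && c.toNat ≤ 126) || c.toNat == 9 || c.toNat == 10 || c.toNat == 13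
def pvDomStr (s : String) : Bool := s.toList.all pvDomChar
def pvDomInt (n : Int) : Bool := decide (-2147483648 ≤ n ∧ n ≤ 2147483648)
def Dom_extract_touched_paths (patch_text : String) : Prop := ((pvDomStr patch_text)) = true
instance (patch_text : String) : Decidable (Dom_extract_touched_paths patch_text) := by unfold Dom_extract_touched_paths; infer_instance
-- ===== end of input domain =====

-- B replaces A's single pass with elif-branches by two marker-specific passes over
-- pre-stripped lines whose concatenation is deduplicated and sorted (objective: alternative).

-- ===== PORT A =====
def extract_touched_paths (patch_text : String) : List String :=
  let paths : PySem.Set String :=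
    (PySem.Str.splitlines patch_text).foldl (fun paths raw =>
      let line := PySem.Str.strip raw
      if PySem.Str.startswith line "+++ " then
        let p0 := PySem.Str.strip (PySem.Str.slice line (some 4) none)
        let p := if PySem.Str.startswith p0 "b/" then PySem.Str.slice p0 (some 2) none else p0
        if p != "" && p != "/dev/null" then PySem.Set.add paths p else paths
      else if PySem.Str.startswith line "--- " then
        let p0 := PySem.Str.strip (PySem.Str.slice line (some 4) none)
        let p := if PySem.Str.startswith p0 "a/" then PySem.Str.slice p0 (some 2) none else p0
        if p != "" && p != "/dev/null" then PySem.Set.add paths p else paths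
      else paths) PySem.Set.empty
  PySem.List.sorted paths (fun x => x) false

-- ===== PORT B =====
-- helper paths_for of Source B (closes over the pre-stripped lines)
def pvPathsFor (lines : List String) (marker pfx : String) : List String :=
  lines.foldl (fun out line =>
    if PySem.Str.startswith line marker then
      let p0 := PySem.Str.strip (PySem.Str.slice line (some (PySem.Str.len marker)) none)
      let p := if PySem.Str.startswith p0 pfx then PySem.Str.slice p0 (some (PySem.Str.len pfx)) none else p0
      if p != "" && p != "/dev/null" then out ++ [p] else out
    else out) []

def extract_touched_paths_alt (patch_text : String) : List String :=
  let lines := (PySem.Str.splitlines patch_text).map PySem.Str.strip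
  PySem.List.sorted
    (PySem.Set.ofList (pvPathsFor lines "+++ " "b/" ++ pvPathsFor lines "--- " "a/"))
    (fun x => x) false

-- ===== PRECONDITION & SPEC =====
def Spec_extract_touched_paths (patch_text : String) (out : List String) : Prop := out = extract_touched_paths_alt patch_text
instance (patch_text : String) (out : List String) : Decidable (Spec_extract_touched_paths patch_text out) := by unfold Spec_extract_touched_paths; infer_instance

-- ===== CLAIM (what is proved, stated in full; the proofs are below) =====
def Claim_equal_extract_touched_paths : Prop := ∀ (patch_text : String), Dom_extract_touched_paths patch_text → Spec_extract_touched_paths patch_text (extract_touched_paths patch_text)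

-- ===== LEMMAS AND PROOFS =====
set_option maxRecDepth 8192

-- the path a marker line contributes and the keep-condition (shared characterisation)
def pvF (m pfx : String) (line : String) : String :=
  let p0 := PySem.Str.strip (PySem.Str.slice line (some (PySem.Str.len m)) none)
  if PySem.Str.startswith p0 pfx then PySem.Str.slice p0 (some (PySem.Str.len pfx)) none else p0

def pvC (m pfx : String) (line : String) : Bool :=
  PySem.Str.startswith line m && (pvF m pfx line != "" && pvF m pfx line != "/dev/null")

theorem pv_mem_pathsFor_gen (m pfx : String) (ls : List String) (acc : List String) (q : String) :
    q ∈ ls.foldl (fun out line =>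
      if PySem.Str.startswith line m then
        let p0 := PySem.Str.strip (PySem.Str.slice line (some (PySem.Str.len m)) none)
        let p := if PySem.Str.startswith p0 pfx then PySem.Str.slice p0 (some (PySem.Str.len pfx)) none else p0
        if p != "" && p != "/dev/null" then out ++ [p] else out
      else out) acc
    ↔ q ∈ acc ∨ ∃ line ∈ ls, pvC m pfx line = true ∧ pvF m pfx line = q := by
  induction ls generalizing acc with
  | nil => simp
  | cons hd tl ih =>
    simp only [List.foldl_cons, ih, List.mem_cons]
    have hstep : ∀ out : List String, q ∈ (if PySem.Str.startswith hd m then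
        let p0 := PySem.Str.strip (PySem.Str.slice hd (some (PySem.Str.len m)) none)
        let p := if PySem.Str.startswith p0 pfx then PySem.Str.slice p0 (some (PySem.Str.len pfx)) none else p0
        if p != "" && p != "/dev/null" then out ++ [p] else out
      else out) ↔ q ∈ out ∨ (pvC m pfx hd = true ∧ pvF m pfx hd = q) := by
      intro out
      simp only [pvC, pvF]
      by_cases h1 : PySem.Str.startswith hd m = true
      · rw [if_pos h1]
        simp only [h1, Bool.true_and]
        cases hk : ((if PySem.Str.startswith (PySem.Str.strip (PySem.Str.slice hd (some (PySem.Str.len m)) none)) pfx then PySem.Str.slice (PySem.Str.strip (PySem.Str.slice hd (some (PySem.Str.len m)) none)) (some (PySem.Str.len pfx)) none else PySem.Str.strip (PySem.Str.slice hd (some (PySem.Str.len m)) none)) != "" && (if PySem.Str.startswith (PySem.Str.strip (PySem.Str.slice hd (some (PySem.Str.len m)) none)) pfx then PySem.Str.slice (PySem.Str.strip (PySem.Str.slice hd (some (PySem.Str.len m)) none)) (some (PySem.Str.len pfx)) none else PySem.Str.strip (PySem.Str.slice hd (some (PySem.Str.len m)) none)) != "/dev/null") with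
        | true =>
          rw [if_pos rfl]
          simp only [List.mem_append, List.mem_singleton, true_and]
          constructor
          · rintro (h | h)
            · exact Or.inl h
            · exact Or.inr h.symm
          · rintro (h | h)
            · exact Or.inl h
            · exact Or.inr h.symm
        | false =>
          rw [if_neg Bool.false_ne_true]
          simp only [Bool.false_eq_true, false_and, or_false]
      · rw [if_neg h1]
        simp only [Bool.not_eq_true] at h1
        simp only [Bool.and_eq_true, h1, Bool.false_eq_true, false_and, or_false]
    rw [hstep acc]
    constructor
    · rintro ((h | h) | ⟨l, hl, hq⟩)
      · exact Or.inl h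
      · exact Or.inr ⟨hd, Or.inl rfl, h⟩
      · exact Or.inr ⟨l, Or.inr hl, hq⟩
    · rintro (h | ⟨l, (rfl | hl), hq⟩)
      · exact Or.inl (Or.inl h)
      · exact Or.inl (Or.inr hq)
      · exact Or.inr ⟨l, hl, hq⟩

theorem pv_mem_pathsFor (lines : List String) (m pfx : String) (q : String) :
    q ∈ pvPathsFor lines m pfx ↔ ∃ line ∈ lines, pvC m pfx line = true ∧ pvF m pfx line = q := by
  unfold pvPathsFor
  rw [pv_mem_pathsFor_gen]
  simp

-- a line cannot start with both markers
theorem pv_marker_excl (l : String) (h : PySem.Str.startswith l "+++ " = true) :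
    PySem.Str.startswith l "--- " = false := by
  rw [Bool.eq_false_iff]
  intro h2
  rw [PySem.Str.startswith_eq, PySem.Chars.startswith_iff] at h h2
  obtain ⟨t1, h1⟩ := h
  obtain ⟨t2, h3⟩ := h2
  rw [← h3] at h1
  simp at h1

theorem pv_len_plus : PySem.Str.len "+++ " = 4 := by decide
theorem pv_len_minus : PySem.Str.len "--- " = 4 := by decide
theorem pv_len_b : PySem.Str.len "b/" = 2 := by decide
theorem pv_len_a : PySem.Str.len "a/" = 2 := by decide

-- A's per-line contribution, as a candidate list
def pvCandA (raw : String) : List String :=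
  let line := PySem.Str.strip raw
  if PySem.Str.startswith line "+++ " then
    (if pvC "+++ " "b/" line then [pvF "+++ " "b/" line] else [])
  else if PySem.Str.startswith line "--- " then
    (if pvC "--- " "a/" line then [pvF "--- " "a/" line] else [])
  else []

-- one step of A's loop, as set membership
theorem pv_stepA_mem (t : PySem.Set String) (hd q : String) :
    q ∈ (let line := PySem.Str.strip hd
      if PySem.Str.startswith line "+++ " then
        let p0 := PySem.Str.strip (PySem.Str.slice line (some 4) none)
        let p := if PySem.Str.startswith p0 "b/" then PySem.Str.slice p0 (some 2) none else p0
        if p != "" && p != "/dev/null" then PySem.Set.add t p else t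
      else if PySem.Str.startswith line "--- " then
        let p0 := PySem.Str.strip (PySem.Str.slice line (some 4) none)
        let p := if PySem.Str.startswith p0 "a/" then PySem.Str.slice p0 (some 2) none else p0
        if p != "" && p != "/dev/null" then PySem.Set.add t p else t
      else t) ↔ q ∈ t ∨ q ∈ pvCandA hd := by
  simp only [pvCandA, pvC, pvF, pv_len_plus, pv_len_minus, pv_len_b, pv_len_a]
  by_cases h1 : PySem.Str.startswith (PySem.Str.strip hd) "+++ " = true
  · rw [if_pos h1, if_pos h1]
    simp only [h1, Bool.true_and]
    cases hk : ((if PySem.Str.startswith (PySem.Str.strip (PySem.Str.slice (PySem.Str.strip hd) (some 4) none)) "b/" then PySem.Str.slice (PySem.Str.strip (PySem.Str.slice (PySem.Str.strip hd) (some 4) none)) (some 2) none else PySem.Str.strip (PySem.Str.slice (PySem.Str.strip hd) (some 4) none)) != "" && (if PySem.Str.startswith (PySem.Str.strip (PySem.Str.slice (PySem.Str.strip hd) (some 4) none)) "b/" then PySem.Str.slice (PySem.Str.strip (PySem.Str.slice (PySem.Str.strip hd) (some 4) none)) (some 2) none else PySem.Str.strip (PySem.Str.slice (PySem.Str.strip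 hd) (some 4) none)) != "/dev/null") with
    | true =>
      rw [if_pos rfl, if_pos rfl]
      simp only [PySem.Set.mem_add, List.mem_singleton]
    | false =>
      rw [if_neg Bool.false_ne_true, if_neg Bool.false_ne_true]
      simp only [List.not_mem_nil, or_false]
  · rw [if_neg h1, if_neg h1]
    by_cases h2 : PySem.Str.startswith (PySem.Str.strip hd) "--- " = true
    · rw [if_pos h2, if_pos h2]
      simp only [h2, Bool.true_and]
      cases hk : ((if PySem.Str.startswith (PySem.Str.strip (PySem.Str.slice (PySem.Str.strip hd) (some 4) none)) "a/" then PySem.Str.slice (PySem.Str.strip (PySem.Str.slice (PySem.Str.strip hd) (some 4) none)) (some 2) none else PySem.Str.strip (PySem.Str.slice (PySem.Str.strip hd) (some 4) none)) != "" && (if PySem.Str.startswith (PySem.Str.strip (PySem.Str.slice (PySem.Str.strip hd) (some 4) none)) "a/" then PySem.Str.slice (PySem.Str.strip (PySem.Str.slice (PySem.Str.strip hd) (some 4) none)) (some 2) none else PySem.Str.strip (PySem.Str.slice (PySem.Str.strip hd) (some 4) none)) != "/dev/null") with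
      | true =>
        rw [if_pos rfl, if_pos rfl]
        simp only [PySem.Set.mem_add, List.mem_singleton]
      | false =>
        rw [if_neg Bool.false_ne_true, if_neg Bool.false_ne_true]
        simp only [List.not_mem_nil, or_false]
    · rw [if_neg h2, if_neg h2]
      simp only [List.not_mem_nil, or_false]

theorem pv_foldA_mem (ls : List String) (s : PySem.Set String) (q : String) :
    q ∈ ls.foldl (fun paths raw =>
      let line := PySem.Str.strip raw
      if PySem.Str.startswith line "+++ " then
        let p0 := PySem.Str.strip (PySem.Str.slice line (some 4) none)
        let p := if PySem.Str.startswith p0 "b/" then PySem.Str.slice p0 (some 2) none else p0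
        if p != "" && p != "/dev/null" then PySem.Set.add paths p else paths
      else if PySem.Str.startswith line "--- " then
        let p0 := PySem.Str.strip (PySem.Str.slice line (some 4) none)
        let p := if PySem.Str.startswith p0 "a/" then PySem.Str.slice p0 (some 2) none else p0
        if p != "" && p != "/dev/null" then PySem.Set.add paths p else paths
      else paths) s
    ↔ q ∈ s ∨ ∃ raw ∈ ls, q ∈ pvCandA raw := by
  induction ls generalizing s with
  | nil => simp
  | cons hd tl ih =>
    simp only [List.foldl_cons, ih, List.mem_cons]
    rw [pv_stepA_mem s hd q]
    constructor
    · rintro ((h | h) | ⟨r, hr, hq⟩)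
      · exact Or.inl h
      · exact Or.inr ⟨hd, Or.inl rfl, h⟩
      · exact Or.inr ⟨r, Or.inr hr, hq⟩
    · rintro (h | ⟨r, (rfl | hr), hq⟩)
      · exact Or.inl (Or.inl h)
      · exact Or.inl (Or.inr hq)
      · exact Or.inr ⟨r, hr, hq⟩

theorem pv_foldA_nodup (ls : List String) (s : PySem.Set String) (hs : s.Nodup) :
    (ls.foldl (fun paths raw =>
      let line := PySem.Str.strip raw
      if PySem.Str.startswith line "+++ " then
        let p0 := PySem.Str.strip (PySem.Str.slice line (some 4) none)
        let p := if PySem.Str.startswith p0 "b/" then PySem.Str.slice p0 (some 2) none else p0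
        if p != "" && p != "/dev/null" then PySem.Set.add paths p else paths
      else if PySem.Str.startswith line "--- " then
        let p0 := PySem.Str.strip (PySem.Str.slice line (some 4) none)
        let p := if PySem.Str.startswith p0 "a/" then PySem.Str.slice p0 (some 2) none else p0
        if p != "" && p != "/dev/null" then PySem.Set.add paths p else paths
      else paths) s).Nodup := by
  induction ls generalizing s with
  | nil => exact hs
  | cons hd tl ih =>
    simp only [List.foldl_cons]
    apply ih
    dsimp only
    split_ifs <;> first | exact PySem.Set.nodup_add _ _ hs | exact hs

-- A's candidate list splits into B's two per-marker contributions (markers exclude each other)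
theorem pv_cand_split (raw q : String) :
    q ∈ pvCandA raw ↔
      (pvC "+++ " "b/" (PySem.Str.strip raw) = true ∧ pvF "+++ " "b/" (PySem.Str.strip raw) = q)
      ∨ (pvC "--- " "a/" (PySem.Str.strip raw) = true ∧ pvF "--- " "a/" (PySem.Str.strip raw) = q) := by
  unfold pvCandA
  by_cases h1 : PySem.Str.startswith (PySem.Str.strip raw) "+++ " = true
  · have h2 := pv_marker_excl _ h1
    rw [if_pos h1]
    have hcm : pvC "--- " "a/" (PySem.Str.strip raw) = false := by
      simp only [pvC, h2, Bool.false_and]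
    cases hc : pvC "+++ " "b/" (PySem.Str.strip raw) with
    | true =>
      rw [if_pos rfl]
      simp only [List.mem_singleton, hcm, Bool.false_eq_true, false_and, or_false, true_and]
      exact eq_comm
    | false =>
      rw [if_neg Bool.false_ne_true]
      simp only [List.not_mem_nil, Bool.false_eq_true, false_and, hcm, or_false]
  · rw [if_neg h1]
    have hcp : pvC "+++ " "b/" (PySem.Str.strip raw) = false := by
      simp only [pvC, Bool.not_eq_true] at h1 ⊢
      rw [h1, Bool.false_and]
    by_cases h2 : PySem.Str.startswith (PySem.Str.strip raw) "--- " = true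
    · rw [if_pos h2]
      cases hc : pvC "--- " "a/" (PySem.Str.strip raw) with
      | true =>
        rw [if_pos rfl]
        simp only [List.mem_singleton, hcp, Bool.false_eq_true, false_and, false_or, true_and]
        exact eq_comm
      | false =>
        rw [if_neg Bool.false_ne_true]
        simp only [List.not_mem_nil, Bool.false_eq_true, false_and, hcp, or_false]
    · rw [if_neg h2]
      simp only [Bool.not_eq_true] at h2
      have hcm : pvC "--- " "a/" (PySem.Str.strip raw) = false := by
        simp only [pvC, h2, Bool.false_and]
      simp only [List.not_mem_nil, hcp, hcm, Bool.false_eq_true, false_and, or_false]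

-- ===== VERDICT (by name: the statement is the Claim_ definition above) =====
theorem extract_touched_paths_spec : Claim_equal_extract_touched_paths := by
  intro patch _
  unfold Spec_extract_touched_paths extract_touched_paths extract_touched_paths_alt
  rw [PySem.List.sorted_id_eq_sorted_id_iff_perm]
  refine (List.perm_ext_iff_of_nodup
    (pv_foldA_nodup _ PySem.Set.empty (List.nodup_nil))
    (PySem.Set.nodup_ofList _)).mpr ?_
  intro q
  rw [pv_foldA_mem, PySem.Set.mem_ofList, List.mem_append,
    pv_mem_pathsFor, pv_mem_pathsFor]
  simp only [PySem.Set.empty, List.not_mem_nil, false_or, List.mem_map]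
  constructor
  · rintro ⟨raw, hraw, hq⟩
    rcases (pv_cand_split raw q).mp hq with h | h
    · exact Or.inl ⟨PySem.Str.strip raw, ⟨raw, hraw, rfl⟩, h⟩
    · exact Or.inr ⟨PySem.Str.strip raw, ⟨raw, hraw, rfl⟩, h⟩
  · rintro (⟨l, ⟨raw, hraw, rfl⟩, h⟩ | ⟨l, ⟨raw, hraw, rfl⟩, h⟩)
    · exact ⟨raw, hraw, (pv_cand_split raw q).mpr (Or.inl h)⟩
    · exact ⟨raw, hraw, (pv_cand_split raw q).mpr (Or.inr h)⟩
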